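-- pv_equiv track=rewrite | github.com/sol-commits/coding-test | 백준/Silver/1890. 점프/점프.py | get_path_counts
-- ===== SOURCE A (Python) =====
-- def is_in_bounds(row, col, size):
--     return (0 <= row < size) and (0 <= col < size)
--
-- def get_path_counts(row, col, dp, board, board_size):
--     if not is_in_bounds(row, col, board_size):
--         return 0
--     if dp[row][col] != 0:
--         return dp[row][col]
--
--     # 위 쪽에서 점프 가능할 때
--     for r in range(row):
--         if board[r][col] == row - r:
--             dp[row][col] += get_path_counts(r, col, dp, board, board_size)
--     # 왼쪽에서 점프 가능할 때
--     for c in range(col):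
--         if board[row][c] == col - c:
--             dp[row][col] += get_path_counts(row, c, dp, board, board_size)
--
--     return dp[row][col]
-- ===== SOURCE B (Python) =====
-- def get_path_counts(row, col, dp, board, board_size):
--     if not (0 <= row < board_size and 0 <= col < board_size):
--         return 0
--     # forward DP over the (row+1) x (col+1) rectangle, pushing each cell's
--     # path count to its (at most two) jump destinations
--     acc = [[0] * (col + 1) for _ in range(row + 1)]
--     for r in range(row + 1):
--         for c in range(col + 1):
--             v = dp[r][c]
--             if v == 0:
--                 v = acc[r][c]
--             acc[r][c] = v
--             k = board[r][c]
--             if k > 0: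
--                 if r + k <= row:
--                     acc[r + k][c] += v
--                 if c + k <= col:
--                     acc[r][c + k] += v
--     return acc[row][col]
-- ===== Notes on version B (the rewrite author's own statement) =====
-- stated objective: alternative
-- what changed: replaces the memoized top-down recursion (which, per cell, scans every cell above and to its left for possible jump sources) by an iterative forward DP over the rectangle that pushes each cell's count to its at most two jump destinations
-- outside the precondition, e.g. on get_path_counts(1, 0, [[5], [7]], [], 2): A returns 7, B raises IndexError
import Mathlib
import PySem

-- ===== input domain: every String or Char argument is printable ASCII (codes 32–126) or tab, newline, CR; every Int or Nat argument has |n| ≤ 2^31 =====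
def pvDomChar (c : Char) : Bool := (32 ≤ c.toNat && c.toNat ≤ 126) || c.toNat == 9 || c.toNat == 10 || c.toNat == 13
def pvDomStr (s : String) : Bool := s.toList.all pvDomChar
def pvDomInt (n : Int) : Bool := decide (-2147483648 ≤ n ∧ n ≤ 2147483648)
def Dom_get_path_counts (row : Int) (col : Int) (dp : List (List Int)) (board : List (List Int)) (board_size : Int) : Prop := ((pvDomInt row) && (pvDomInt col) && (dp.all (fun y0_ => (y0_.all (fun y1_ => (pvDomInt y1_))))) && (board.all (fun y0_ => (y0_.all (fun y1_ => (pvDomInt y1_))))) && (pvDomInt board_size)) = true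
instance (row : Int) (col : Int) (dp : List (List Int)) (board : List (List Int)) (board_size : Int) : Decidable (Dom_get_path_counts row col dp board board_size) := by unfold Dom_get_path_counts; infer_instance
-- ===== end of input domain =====

-- B replaces A's memoized top-down recursion by an iterative forward DP that pushes each
-- cell's count to its at most two jump destinations; equivalence is about the RETURN
-- value only (A mutates the dp argument in place, B does not).

-- shared Python-subscript helpers: m[i][j] read and m[i][j] = v store
def pvGet2 (m : List (List Int)) (i j : Int) : Int :=
  PySem.List.pyGetD (PySem.List.pyGetD m i []) j 0

def pvSet2 (m : List (List Int)) (i j : Int) (v : Int) : List (List Int) :=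
  PySem.List.pySetD m i (PySem.List.pySetD (PySem.List.pyGetD m i []) j v)

-- ===== PORT A =====
-- A's recursion mutates dp; the port threads dp as explicit state and returns
-- (value, final dp).  fuel only makes the recursion structural: row+col strictly
-- decreases at every recursive call, so fuel = row.toNat+col.toNat+1 never runs out.
def pvGoA : Nat → Int → Int → List (List Int) → List (List Int) → Int → Int × List (List Int)
  | 0, _, _, d, _, _ => (0, d)
  | fuel+1, row, col, d, b, size =>
    if ¬ (0 ≤ row ∧ row < size ∧ 0 ≤ col ∧ col < size) then (0, d)
    else if pvGet2 d row col ≠ 0 then (pvGet2 d row col, d)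
    else
      let d1 := (PySem.List.pyRange 0 row 1).foldl (fun acc r =>
        if pvGet2 b r col = row - r then
          let old := pvGet2 acc row col
          let p := pvGoA fuel r col acc b size
          pvSet2 p.2 row col (old + p.1)
        else acc) d
      let d2 := (PySem.List.pyRange 0 col 1).foldl (fun acc c =>
        if pvGet2 b row c = col - c then
          let old := pvGet2 acc row col
          let p := pvGoA fuel row c acc b size
          pvSet2 p.2 row col (old + p.1)
        else acc) d1
      (pvGet2 d2 row col, d2)

def get_path_counts (row : Int) (col : Int) (dp : List (List Int)) (board : List (List Int)) (board_size : Int) : Int :=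
  (pvGoA (row.toNat + col.toNat + 1) row col dp board board_size).1

-- ===== PORT B =====
-- body of B's inner loop: settle cell (r,c), then push its count to its two jump targets
def pvStepB (dp board : List (List Int)) (row col : Int) (a : List (List Int)) (r c : Int) : List (List Int) :=
  let v0 := pvGet2 dp r c
  let v := if v0 = 0 then pvGet2 a r c else v0
  let a1 := pvSet2 a r c v
  let k := pvGet2 board r c
  if 0 < k then
    let a2 := if r + k ≤ row then pvSet2 a1 (r + k) c (pvGet2 a1 (r + k) c + v) else a1
    if c + k ≤ col then pvSet2 a2 r (c + k) (pvGet2 a2 r (c + k) + v) else a2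
  else a1

def get_path_counts_alt (row : Int) (col : Int) (dp : List (List Int)) (board : List (List Int)) (board_size : Int) : Int :=
  if ¬ (0 ≤ row ∧ row < board_size ∧ 0 ≤ col ∧ col < board_size) then 0
  else
    let acc0 : List (List Int) := List.replicate (row + 1).toNat (List.replicate (col + 1).toNat 0)
    let accF := (PySem.List.pyRange 0 (row + 1) 1).foldl (fun a r =>
      (PySem.List.pyRange 0 (col + 1) 1).foldl (fun a c => pvStepB dp board row col a r c) a) acc0
    pvGet2 accF row col

-- ===== PRECONDITION & SPEC =====
-- Pre_ excludes exactly the in-bounds inputs whose dp/board rows do not cover the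
-- [0..row]×[0..col] rectangle: on most of those A raises IndexError, and on the rest
-- (where a nonzero memo entry in dp cuts A's recursion short before the missing cell)
-- B raises while A returns.
def Pre_get_path_counts (row : Int) (col : Int) (dp : List (List Int)) (board : List (List Int)) (board_size : Int) : Prop :=
  (0 ≤ row ∧ row < board_size ∧ 0 ≤ col ∧ col < board_size) →
  ∀ r : Nat, r < row.toNat + 1 →
    r < dp.length ∧ r < board.length ∧
    col.toNat < (dp.getD r []).length ∧ col.toNat < (board.getD r []).length

instance (row : Int) (col : Int) (dp : List (List Int)) (board : List (List Int)) (board_size : Int) : Decidable (Pre_get_path_counts row col dp board board_size) := by unfold Pre_get_path_counts; infer_instance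

def pvWitness_get_path_counts : Int × Int × List (List Int) × List (List Int) × Int :=
  (0, 0, [[1]], [[0]], 1)

def Spec_get_path_counts (row : Int) (col : Int) (dp : List (List Int)) (board : List (List Int)) (board_size : Int) (out : Int) : Prop := out = get_path_counts_alt row col dp board board_size
instance (row : Int) (col : Int) (dp : List (List Int)) (board : List (List Int)) (board_size : Int) (out : Int) : Decidable (Spec_get_path_counts row col dp board board_size out) := by unfold Spec_get_path_counts; infer_instance

-- ===== CLAIM (what is proved, stated in full; the proofs are below) =====
def Claim_equal_get_path_counts : Prop := ∀ (row : Int) (col : Int) (dp : List (List Int)) (board : List (List Int)) (board_size : Int), Dom_get_path_counts row col dp board board_size → Pre_get_path_counts row col dp board board_size → Spec_get_path_counts row col dp board board_size (get_path_counts row col dp board board_size)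

-- ===== LEMMAS AND PROOFS =====

-- Nat-indexed views of the subscript helpers
def gN (m : List (List Int)) (i j : Nat) : Int := (m.getD i []).getD j 0
def sN (m : List (List Int)) (i j : Nat) (v : Int) : List (List Int) :=
  m.set i ((m.getD i []).set j v)

lemma pvGet2_natCast (m : List (List Int)) (i j : Nat) : pvGet2 m (i:Int) (j:Int) = gN m i j := by
  simp [pvGet2, gN]

lemma pvSet2_natCast (m : List (List Int)) (i j : Nat) (v : Int) :
    pvSet2 m (i:Int) (j:Int) v = sN m i j v := by
  simp [pvSet2, sN]

lemma gN_sN_eq (m : List (List Int)) (i j : Nat) (v : Int)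
    (hi : i < m.length) (hj : j < (m.getD i []).length) :
    gN (sN m i j v) i j = v := by
  simp [gN, sN, List.getD_eq_getElem?_getD, List.getElem?_set_self hi]
  rw [List.getElem?_set_self]
  · rfl
  · simpa [List.getD_eq_getElem?_getD, List.getElem?_eq_getElem hi] using hj

lemma gN_sN_ne (m : List (List Int)) (i j r c : Nat) (v : Int)
    (h : ¬ (r = i ∧ c = j)) :
    gN (sN m i j v) r c = gN m r c := by
  by_cases hr : r = i
  · subst hr
    have hc : c ≠ j := fun hc => h ⟨rfl, hc⟩
    by_cases hi : r < m.length
    · simp [gN, sN, List.getD_eq_getElem?_getD, List.getElem?_set_self hi,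
        List.getElem?_eq_getElem hi, List.getElem?_set_ne (Ne.symm hc)]
    · simp [gN, sN, List.set_eq_of_length_le (Nat.le_of_not_lt hi)]
  · simp [gN, sN, List.getD_eq_getElem?_getD, List.getElem?_set_ne (fun he => hr he.symm)]

lemma length_sN (m : List (List Int)) (i j : Nat) (v : Int) : (sN m i j v).length = m.length := by
  simp [sN]

lemma row_sN (m : List (List Int)) (i j : Nat) (v : Int) (r : Nat) :
    ((sN m i j v).getD r []).length = (m.getD r []).length := by
  by_cases hr : r = i
  · subst hr
    by_cases hi : r < m.length
    · simp [sN, List.getD_eq_getElem?_getD, List.getElem?_set_self hi,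
        List.getElem?_eq_getElem hi]
    · simp [sN, List.set_eq_of_length_le (Nat.le_of_not_lt hi)]
  · simp [sN, List.getD_eq_getElem?_getD, List.getElem?_set_ne (fun he => hr he.symm)]

-- specification: the pure path-count function both programs compute (fuel-indexed)
def fS (dp0 b : List (List Int)) : Nat → Nat → Nat → Int
  | 0, _, _ => 0
  | fuel+1, i, j =>
    if gN dp0 i j ≠ 0 then gN dp0 i j
    else (∑ r ∈ Finset.range i, if gN b r j = (i : Int) - (r : Int) then fS dp0 b fuel r j else 0)
       + (∑ c ∈ Finset.range j, if gN b i c = (j : Int) - (c : Int) then fS dp0 b fuel i c else 0)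

def fF (dp0 b : List (List Int)) (i j : Nat) : Int := fS dp0 b (i + j + 1) i j

lemma fS_congr (dp0 b : List (List Int)) :
    ∀ f1 f2 i j, i + j < f1 → i + j < f2 → fS dp0 b f1 i j = fS dp0 b f2 i j := by
  intro f1
  induction f1 with
  | zero => intro f2 i j h; omega
  | succ f1 ih =>
    intro f2 i j h1 h2
    match f2, h2 with
    | f2+1, h2 =>
      simp only [fS]
      by_cases h0 : gN dp0 i j ≠ 0
      · simp [h0]
      · rw [if_neg h0, if_neg h0]
        congr 1
        · refine Finset.sum_congr rfl fun r hr => ?_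
          have hr' := Finset.mem_range.mp hr
          rw [ih f2 r j (by omega) (by omega)]
        · refine Finset.sum_congr rfl fun c hc => ?_
          have hc' := Finset.mem_range.mp hc
          rw [ih f2 i c (by omega) (by omega)]

-- the two partial incoming sums A accumulates
def S1 (dp0 b : List (List Int)) (i j k : Nat) : Int :=
  ∑ r ∈ Finset.range k, if gN b r j = (i : Int) - (r : Int) then fF dp0 b r j else 0
def S2 (dp0 b : List (List Int)) (i j k : Nat) : Int :=
  ∑ c ∈ Finset.range k, if gN b i c = (j : Int) - (c : Int) then fF dp0 b i c else 0

lemma fF_eq (dp0 b : List (List Int)) (i j : Nat) :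
    fF dp0 b i j =
      if gN dp0 i j ≠ 0 then gN dp0 i j
      else S1 dp0 b i j i + S2 dp0 b i j j := by
  show fS dp0 b (i+j+1) i j = _
  simp only [fS]
  by_cases h0 : gN dp0 i j ≠ 0
  · simp [h0]
  · rw [if_neg h0, if_neg h0]
    congr 1
    · refine Finset.sum_congr rfl fun r hr => ?_
      have hr' := Finset.mem_range.mp hr
      rw [fS_congr dp0 b (i+j) (r+j+1) r j (by omega) (by omega)]; rfl
    · refine Finset.sum_congr rfl fun c hc => ?_
      have hc' := Finset.mem_range.mp hc
      rw [fS_congr dp0 b (i+j) (i+c+1) i c (by omega) (by omega)]; rfl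

-- rectangle validity and shape preservation
def rectOK (m : List (List Int)) (i j : Nat) : Prop :=
  ∀ r : Nat, r ≤ i → r < m.length ∧ j < (m.getD r []).length

def shapeEq (d d0 : List (List Int)) : Prop :=
  d.length = d0.length ∧ ∀ r : Nat, (d.getD r []).length = (d0.getD r []).length

lemma shapeEq_refl (d : List (List Int)) : shapeEq d d := ⟨rfl, fun _ => rfl⟩

lemma shapeEq_sN (m : List (List Int)) (i j : Nat) (v : Int) (d0 : List (List Int))
    (h : shapeEq m d0) : shapeEq (sN m i j v) d0 := by
  exact ⟨by rw [length_sN]; exact h.1, fun r => by rw [row_sN]; exact h.2 r⟩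

lemma rectOK_mono (m : List (List Int)) {i j i' j' : Nat}
    (h : rectOK m i j) (hi : i' ≤ i) (hj : j' ≤ j) : rectOK m i' j' := by
  intro r hr
  obtain ⟨h1, h2⟩ := h r (le_trans hr hi)
  exact ⟨h1, lt_of_le_of_lt (by omega : j' ≤ j) h2⟩

-- invariant cell property: a dp-state cell is either already the final count, or
-- still untouched (0) with the original dp also 0 there
def Pcell (dp0 b d : List (List Int)) (i j : Nat) : Prop :=
  gN d i j = fF dp0 b i j ∨ (gN d i j = 0 ∧ gN dp0 i j = 0)

-- ===== A-side main lemma =====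
theorem goA_main (dp0 b : List (List Int)) (size : Int) :
    ∀ fuel i j : Nat, ∀ d : List (List Int),
    i + j < fuel → (i : Int) < size → (j : Int) < size →
    rectOK dp0 i j → shapeEq d dp0 →
    (∀ r c : Nat, r ≤ i → c ≤ j → Pcell dp0 b d r c) →
    (pvGoA fuel (i:Int) (j:Int) d b size).1 = fF dp0 b i j ∧
    shapeEq (pvGoA fuel (i:Int) (j:Int) d b size).2 dp0 ∧
    (∀ r c : Nat, r ≤ i → c ≤ j → Pcell dp0 b (pvGoA fuel (i:Int) (j:Int) d b size).2 r c) ∧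
    (∀ r c : Nat, ¬ (r ≤ i ∧ c ≤ j) → gN (pvGoA fuel (i:Int) (j:Int) d b size).2 r c = gN d r c) := by
  intro fuel
  induction fuel with
  | zero => intro i j d h _ _ _ _ _; omega
  | succ fuel ih =>
    intro i j d hfuel hi hj hrect hshape hP
    have hbnd : 0 ≤ (i:Int) ∧ (i:Int) < size ∧ 0 ≤ (j:Int) ∧ (j:Int) < size :=
      ⟨Int.natCast_nonneg i, hi, Int.natCast_nonneg j, hj⟩
    by_cases h0 : gN d i j = 0
    case neg =>
      have key : pvGoA (fuel+1) (i:Int) (j:Int) d b size = (gN d i j, d) := by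
        simp only [pvGoA]
        rw [if_neg (not_not_intro hbnd), if_pos (by rw [pvGet2_natCast]; exact h0),
          pvGet2_natCast]
      rw [key]
      have hfi : gN d i j = fF dp0 b i j := by
        rcases show gN d i j = fF dp0 b i j ∨ (gN d i j = 0 ∧ gN dp0 i j = 0) from
          hP i j le_rfl le_rfl with h | h
        · exact h
        · exact absurd h.1 h0
      exact ⟨hfi, hshape, hP, fun r c _ => rfl⟩
    case pos =>
      have key : pvGoA (fuel+1) (i:Int) (j:Int) d b size =
          (pvGet2
            (List.foldl
              (fun acc c =>
                if pvGet2 b (↑i) c = (↑j) - c then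
                  pvSet2 (pvGoA fuel (↑i) c acc b size).2 (↑i) (↑j)
                    (pvGet2 acc (↑i) (↑j) + (pvGoA fuel (↑i) c acc b size).1)
                else acc)
              (List.foldl
                (fun acc r =>
                  if pvGet2 b r (↑j) = (↑i) - r then
                    pvSet2 (pvGoA fuel r (↑j) acc b size).2 (↑i) (↑j)
                      (pvGet2 acc (↑i) (↑j) + (pvGoA fuel r (↑j) acc b size).1)
                  else acc)
                d (PySem.List.pyRange 0 (↑i) 1))
              (PySem.List.pyRange 0 (↑j) 1))
            (↑i) (↑j),
          List.foldl
            (fun acc c =>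
              if pvGet2 b (↑i) c = (↑j) - c then
                pvSet2 (pvGoA fuel (↑i) c acc b size).2 (↑i) (↑j)
                  (pvGet2 acc (↑i) (↑j) + (pvGoA fuel (↑i) c acc b size).1)
              else acc)
            (List.foldl
              (fun acc r =>
                if pvGet2 b r (↑j) = (↑i) - r then
                  pvSet2 (pvGoA fuel r (↑j) acc b size).2 (↑i) (↑j)
                    (pvGet2 acc (↑i) (↑j) + (pvGoA fuel r (↑j) acc b size).1)
                else acc)
              d (PySem.List.pyRange 0 (↑i) 1))
            (PySem.List.pyRange 0 (↑j) 1)) := by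
        simp only [pvGoA]
        rw [if_neg (not_not_intro hbnd),
          if_neg (not_not_intro (by rw [pvGet2_natCast]; exact h0))]
      set FA : List (List Int) → Int → List (List Int) := fun acc r =>
        if pvGet2 b r (↑j) = (↑i) - r then
          pvSet2 (pvGoA fuel r (↑j) acc b size).2 (↑i) (↑j)
            (pvGet2 acc (↑i) (↑j) + (pvGoA fuel r (↑j) acc b size).1)
        else acc with hFA
      set GA : List (List Int) → Int → List (List Int) := fun acc c =>
        if pvGet2 b (↑i) c = (↑j) - c then
          pvSet2 (pvGoA fuel (↑i) c acc b size).2 (↑i) (↑j)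
            (pvGet2 acc (↑i) (↑j) + (pvGoA fuel (↑i) c acc b size).1)
        else acc with hGA
      have hiv : ∀ m : List (List Int), shapeEq m dp0 → i < m.length := by
        intro m hm; rw [hm.1]; exact (hrect i le_rfl).1
      have hjv : ∀ m : List (List Int), shapeEq m dp0 → j < (m.getD i []).length := by
        intro m hm; rw [hm.2 i]; exact (hrect i le_rfl).2
      have fold1 : ∀ k : Nat, k ≤ i →
          shapeEq (List.foldl FA d (PySem.List.pyRange 0 (k:Int) 1)) dp0 ∧
          (∀ r c : Nat, r ≤ i → c ≤ j → ¬(r = i ∧ c = j) →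
            Pcell dp0 b (List.foldl FA d (PySem.List.pyRange 0 (k:Int) 1)) r c) ∧
          gN (List.foldl FA d (PySem.List.pyRange 0 (k:Int) 1)) i j = S1 dp0 b i j k ∧
          (∀ r c : Nat, ¬(r ≤ i ∧ c ≤ j) →
            gN (List.foldl FA d (PySem.List.pyRange 0 (k:Int) 1)) r c = gN d r c) := by
        intro k
        induction k with
        | zero =>
          intro _
          rw [show ((0:Nat):Int) = 0 from rfl, PySem.List.pyRange_one_eq_nil le_rfl]
          refine ⟨hshape, fun r c hr hc _ => hP r c hr hc, ?_, fun _ _ _ => rfl⟩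
          simpa [S1] using h0
        | succ k ihk =>
          intro hk
          obtain ⟨sh, pc, gv, un⟩ := ihk (by omega)
          rw [show ((k+1:Nat):Int) = (k:Int)+1 by push_cast; ring,
            PySem.List.pyRange_one_succ_right (Int.natCast_nonneg k),
            List.foldl_append, List.foldl_cons, List.foldl_nil]
          set dk := List.foldl FA d (PySem.List.pyRange 0 (k:Int) 1) with hdk
          by_cases hcond : gN b k j = (i:Int) - (k:Int)
          case pos =>
            have hrec := ih k j dk (by omega)
              (lt_trans (by exact_mod_cast (show k < i by omega)) hi)
              hj (rectOK_mono dp0 hrect (by omega) le_rfl) sh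
              (fun r c hr hc => pc r c (by omega) hc (by omega))
            obtain ⟨hv, hsh2, hpc2, hun2⟩ := hrec
            have hstep : FA dk (k:Int) =
                sN (pvGoA fuel (↑k) (↑j) dk b size).2 i j (gN dk i j + fF dp0 b k j) := by
              rw [hFA]
              simp only []
              rw [if_pos (by rw [pvGet2_natCast]; exact hcond)]
              rw [pvGet2_natCast, pvSet2_natCast, hv]
            rw [hstep]
            refine ⟨shapeEq_sN _ _ _ _ _ hsh2, ?_, ?_, ?_⟩
            · intro r c hr hc hne
              have h1 : gN (sN (pvGoA fuel (↑k) (↑j) dk b size).2 i j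
                  (gN dk i j + fF dp0 b k j)) r c
                  = gN (pvGoA fuel (↑k) (↑j) dk b size).2 r c := gN_sN_ne _ _ _ _ _ _ hne
              unfold Pcell
              rw [h1]
              by_cases hrk : r ≤ k
              · exact hpc2 r c hrk hc
              · rw [hun2 r c (by omega)]
                exact pc r c hr hc hne
            · rw [gN_sN_eq _ _ _ _ (hiv _ hsh2) (hjv _ hsh2), gv]
              simp [S1, Finset.sum_range_succ, hcond]
            · intro r c hrc
              have hne : ¬(r = i ∧ c = j) := by omega
              rw [gN_sN_ne _ _ _ _ _ _ hne, hun2 r c (by omega)]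
              exact un r c hrc
          case neg =>
            have hstep : FA dk (k:Int) = dk := by
              rw [hFA]
              simp only []
              rw [if_neg (by rw [pvGet2_natCast]; exact hcond)]
            rw [hstep]
            refine ⟨sh, pc, ?_, un⟩
            rw [gv]
            simp [S1, Finset.sum_range_succ, hcond]
      obtain ⟨sh1, pc1, gv1, un1⟩ := fold1 i le_rfl
      set D1 := List.foldl FA d (PySem.List.pyRange 0 (i:Int) 1) with hD1
      have fold2 : ∀ k : Nat, k ≤ j →
          shapeEq (List.foldl GA D1 (PySem.List.pyRange 0 (k:Int) 1)) dp0 ∧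
          (∀ r c : Nat, r ≤ i → c ≤ j → ¬(r = i ∧ c = j) →
            Pcell dp0 b (List.foldl GA D1 (PySem.List.pyRange 0 (k:Int) 1)) r c) ∧
          gN (List.foldl GA D1 (PySem.List.pyRange 0 (k:Int) 1)) i j
            = S1 dp0 b i j i + S2 dp0 b i j k ∧
          (∀ r c : Nat, ¬(r ≤ i ∧ c ≤ j) →
            gN (List.foldl GA D1 (PySem.List.pyRange 0 (k:Int) 1)) r c = gN d r c) := by
        intro k
        induction k with
        | zero =>
          intro _
          rw [show ((0:Nat):Int) = 0 from rfl, PySem.List.pyRange_one_eq_nil le_rfl]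
          refine ⟨sh1, pc1, ?_, un1⟩
          simpa [S2] using gv1
        | succ k ihk =>
          intro hk
          obtain ⟨sh, pc, gv, un⟩ := ihk (by omega)
          rw [show ((k+1:Nat):Int) = (k:Int)+1 by push_cast; ring,
            PySem.List.pyRange_one_succ_right (Int.natCast_nonneg k),
            List.foldl_append, List.foldl_cons, List.foldl_nil]
          set dk := List.foldl GA D1 (PySem.List.pyRange 0 (k:Int) 1) with hdk
          by_cases hcond : gN b i k = (j:Int) - (k:Int)
          case pos =>
            have hrec := ih i k dk (by omega) hi
              (lt_trans (by exact_mod_cast (show k < j by omega)) hj)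
              (rectOK_mono dp0 hrect le_rfl (by omega)) sh
              (fun r c hr hc => pc r c hr (by omega) (by omega))
            obtain ⟨hv, hsh2, hpc2, hun2⟩ := hrec
            have hstep : GA dk (k:Int) =
                sN (pvGoA fuel (↑i) (↑k) dk b size).2 i j (gN dk i j + fF dp0 b i k) := by
              rw [hGA]
              simp only []
              rw [if_pos (by rw [pvGet2_natCast]; exact hcond)]
              rw [pvGet2_natCast, pvSet2_natCast, hv]
            rw [hstep]
            refine ⟨shapeEq_sN _ _ _ _ _ hsh2, ?_, ?_, ?_⟩
            · intro r c hr hc hne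
              have h1 : gN (sN (pvGoA fuel (↑i) (↑k) dk b size).2 i j
                  (gN dk i j + fF dp0 b i k)) r c
                  = gN (pvGoA fuel (↑i) (↑k) dk b size).2 r c := gN_sN_ne _ _ _ _ _ _ hne
              unfold Pcell
              rw [h1]
              by_cases hck : c ≤ k
              · exact hpc2 r c hr hck
              · rw [hun2 r c (by omega)]
                exact pc r c hr hc hne
            · rw [gN_sN_eq _ _ _ _ (hiv _ hsh2) (hjv _ hsh2), gv]
              simp [S2, Finset.sum_range_succ, hcond, add_assoc]
            · intro r c hrc
              have hne : ¬(r = i ∧ c = j) := by omega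
              rw [gN_sN_ne _ _ _ _ _ _ hne, hun2 r c (by omega)]
              exact un r c hrc
          case neg =>
            have hstep : GA dk (k:Int) = dk := by
              rw [hGA]
              simp only []
              rw [if_neg (by rw [pvGet2_natCast]; exact hcond)]
            rw [hstep]
            refine ⟨sh, pc, ?_, un⟩
            rw [gv]
            simp [S2, Finset.sum_range_succ, hcond]
      obtain ⟨sh2, pc2, gv2, un2⟩ := fold2 j le_rfl
      set D2 := List.foldl GA D1 (PySem.List.pyRange 0 (j:Int) 1) with hD2
      have hdp0 : gN dp0 i j = 0 := by
        by_contra hne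
        rcases show gN d i j = fF dp0 b i j ∨ (gN d i j = 0 ∧ gN dp0 i j = 0) from
          hP i j le_rfl le_rfl with h | h
        · rw [h0] at h
          rw [fF_eq, if_pos hne] at h
          exact hne h.symm
        · exact hne h.2
      have hfinal : gN D2 i j = fF dp0 b i j := by
        rw [gv2, fF_eq, if_neg (not_not_intro hdp0)]
      rw [key]
      refine ⟨?_, sh2, ?_, ?_⟩
      · rw [pvGet2_natCast]; exact hfinal
      · intro r c hr hc
        by_cases hne : r = i ∧ c = j
        · obtain ⟨rfl, rfl⟩ := hne
          exact Or.inl hfinal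
        · exact pc2 r c hr hc hne
      · exact un2

-- ===== B-side =====
def procB (r0 c0 r c : Nat) : Bool := decide (r < r0) || (decide (r = r0) && decide (c < c0))

def pend (dp0 b : List (List Int)) (r0 c0 r c : Nat) : Int :=
  (∑ r' ∈ Finset.range r, if procB r0 c0 r' c = true ∧ gN b r' c = (r : Int) - (r' : Int) then fF dp0 b r' c else 0)
+ (∑ c' ∈ Finset.range c, if procB r0 c0 r c' = true ∧ gN b r c' = (c : Int) - (c' : Int) then fF dp0 b r c' else 0)

def Binv (dp0 b : List (List Int)) (R C r0 c0 : Nat) (a : List (List Int)) : Prop :=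
  a.length = R + 1 ∧ (∀ r : Nat, r < R + 1 → (a.getD r []).length = C + 1) ∧
  ∀ r c : Nat, r ≤ R → c ≤ C →
    gN a r c = (if procB r0 c0 r c then fF dp0 b r c else pend dp0 b r0 c0 r c)

lemma procB_self (r0 c0 : Nat) : procB r0 c0 r0 c0 = false := by simp [procB]

lemma procB_true_iff (r0 c0 r c : Nat) :
    procB r0 c0 r c = true ↔ (r < r0 ∨ (r = r0 ∧ c < c0)) := by
  simp [procB]

lemma procB_step_ne (r0 c0 r c : Nat) (h : ¬ (r = r0 ∧ c = c0)) :
    procB r0 (c0+1) r c = procB r0 c0 r c := by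
  rw [Bool.eq_iff_iff, procB_true_iff, procB_true_iff]
  omega

lemma procB_wrap (r0 C r c : Nat) (hc : c ≤ C) :
    procB r0 (C+1) r c = procB (r0+1) 0 r c := by
  rw [Bool.eq_iff_iff, procB_true_iff, procB_true_iff]
  omega

lemma sum_flip (n t : Nat) (ht : t < n) (f : Nat → Int) (P Q : Nat → Prop)
    [DecidablePred P] [DecidablePred Q]
    (hagree : ∀ x, x ≠ t → (P x ↔ Q x)) (hPt : ¬ P t) (hQt : Q t) :
    (∑ x ∈ Finset.range n, if Q x then f x else 0)
      = (∑ x ∈ Finset.range n, if P x then f x else 0) + f t := by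
  have hmem : t ∈ Finset.range n := Finset.mem_range.mpr ht
  rw [← Finset.sum_erase_add _ _ hmem, ← Finset.sum_erase_add _ _ hmem]
  rw [if_pos hQt, if_neg hPt]
  rw [Finset.sum_congr rfl (fun x hx => by
    rw [if_congr (iff_comm.mp (hagree x (Finset.ne_of_mem_erase hx))) rfl rfl])]
  ring

lemma sum_agree (n : Nat) (f : Nat → Int) (P Q : Nat → Prop)
    [DecidablePred P] [DecidablePred Q] (hagree : ∀ x, x < n → (P x ↔ Q x)) :
    (∑ x ∈ Finset.range n, if Q x then f x else 0)
      = (∑ x ∈ Finset.range n, if P x then f x else 0) := by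
  refine Finset.sum_congr rfl (fun x hx => ?_)
  rw [if_congr (iff_comm.mp (hagree x (Finset.mem_range.mp hx))) rfl rfl]

lemma pend_zero (dp0 b : List (List Int)) (r c : Nat) : pend dp0 b 0 0 r c = 0 := by
  simp [pend, procB]

lemma pend_wrap (dp0 b : List (List Int)) (r0 C r c : Nat) (hc : c ≤ C) :
    pend dp0 b r0 (C+1) r c = pend dp0 b (r0+1) 0 r c := by
  unfold pend
  congr 1
  · refine (sum_agree _ _ _ _ (fun x _ => ?_)).symm
    rw [procB_wrap r0 C x c hc]
  · refine (sum_agree _ _ _ _ (fun x hx => ?_)).symm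
    rw [procB_wrap r0 C r x (by omega)]

-- at its own processing moment a cell's pending sum is its full incoming sum
lemma pend_proc (dp0 b : List (List Int)) (r0 c0 : Nat) :
    pend dp0 b r0 c0 r0 c0 = S1 dp0 b r0 c0 r0 + S2 dp0 b r0 c0 c0 := by
  unfold pend S1 S2
  congr 1
  · refine (sum_agree _ _ _ _ (fun x hx => ?_)).symm
    constructor
    · intro hh; exact hh.2
    · intro hh; exact ⟨(procB_true_iff _ _ _ _).mpr (by omega), hh⟩
  · refine (sum_agree _ _ _ _ (fun x hx => ?_)).symm
    constructor
    · intro hh; exact hh.2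
    · intro hh; exact ⟨(procB_true_iff _ _ _ _).mpr (by omega), hh⟩

-- processing (r0,c0) adds its count to the pending sums of exactly its push targets
lemma pend_step (dp0 b : List (List Int)) (r0 c0 r c : Nat) :
    pend dp0 b r0 (c0+1) r c = pend dp0 b r0 c0 r c
      + (if c = c0 ∧ r0 < r ∧ gN b r0 c0 = (r:Int) - (r0:Int) then fF dp0 b r0 c0 else 0)
      + (if r = r0 ∧ c0 < c ∧ gN b r0 c0 = (c:Int) - (c0:Int) then fF dp0 b r0 c0 else 0) := by
  unfold pend
  have h1 : (∑ r' ∈ Finset.range r,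
      if procB r0 (c0+1) r' c = true ∧ gN b r' c = (r:Int) - (r':Int) then fF dp0 b r' c else 0)
      = (∑ r' ∈ Finset.range r,
      if procB r0 c0 r' c = true ∧ gN b r' c = (r:Int) - (r':Int) then fF dp0 b r' c else 0)
      + (if c = c0 ∧ r0 < r ∧ gN b r0 c0 = (r:Int) - (r0:Int) then fF dp0 b r0 c0 else 0) := by
    by_cases hrel : c = c0 ∧ r0 < r ∧ gN b r0 c0 = (r:Int) - (r0:Int)
    · obtain ⟨hcc, hlt, hb⟩ := hrel
      rw [if_pos ⟨hcc, hlt, hb⟩]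
      subst hcc
      refine sum_flip r r0 hlt _ _ _ (fun x hx => ?_) ?_ ?_
      · rw [procB_step_ne r0 c x c (fun hh => hx hh.1)]
      · intro hh
        rw [procB_self] at hh
        exact Bool.false_ne_true hh.1
      · exact ⟨(procB_true_iff _ _ _ _).mpr (by omega), hb⟩
    · rw [if_neg hrel, add_zero]
      refine sum_agree _ _ _ _ (fun x hx => ?_)
      by_cases hx0 : x = r0 ∧ c = c0
      · constructor
        · intro hh
          rw [hx0.1, hx0.2, procB_self] at hh
          exact absurd hh.1 Bool.false_ne_true
        · intro hh
          refine absurd ⟨hx0.2, by omega, ?_⟩ hrel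
          rw [← hx0.1, ← hx0.2]
          exact hh.2
      · rw [procB_step_ne r0 c0 x c hx0]
  have h2 : (∑ c' ∈ Finset.range c,
      if procB r0 (c0+1) r c' = true ∧ gN b r c' = (c:Int) - (c':Int) then fF dp0 b r c' else 0)
      = (∑ c' ∈ Finset.range c,
      if procB r0 c0 r c' = true ∧ gN b r c' = (c:Int) - (c':Int) then fF dp0 b r c' else 0)
      + (if r = r0 ∧ c0 < c ∧ gN b r0 c0 = (c:Int) - (c0:Int) then fF dp0 b r0 c0 else 0) := by
    by_cases hrel : r = r0 ∧ c0 < c ∧ gN b r0 c0 = (c:Int) - (c0:Int)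
    · obtain ⟨hrr, hlt, hb⟩ := hrel
      rw [if_pos ⟨hrr, hlt, hb⟩]
      subst hrr
      refine sum_flip c c0 hlt _ _ _ (fun x hx => ?_) ?_ ?_
      · rw [procB_step_ne r c0 r x (fun hh => hx hh.2)]
      · intro hh
        rw [procB_self] at hh
        exact Bool.false_ne_true hh.1
      · exact ⟨(procB_true_iff _ _ _ _).mpr (by omega), hb⟩
    · rw [if_neg hrel, add_zero]
      refine sum_agree _ _ _ _ (fun x hx => ?_)
      by_cases hx0 : r = r0 ∧ x = c0
      · constructor
        · intro hh
          rw [hx0.1, hx0.2, procB_self] at hh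
          exact absurd hh.1 Bool.false_ne_true
        · intro hh
          refine absurd ⟨hx0.1, by omega, ?_⟩ hrel
          rw [← hx0.1, ← hx0.2]
          exact hh.2
      · rw [procB_step_ne r0 c0 r x hx0]
  rw [h1, h2]; ring

-- one inner-loop step preserves the forward-DP invariant
lemma stepB_inv (dp0 b : List (List Int)) (R C r0 c0 : Nat) (a : List (List Int))
    (hr0 : r0 ≤ R) (hc0 : c0 ≤ C) (h : Binv dp0 b R C r0 c0 a) :
    Binv dp0 b R C r0 (c0+1) (pvStepB dp0 b (R:Int) (C:Int) a (r0:Int) (c0:Int)) := by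
  obtain ⟨hlen, hrow, hcell⟩ := h
  have hcur : gN a r0 c0 = pend dp0 b r0 c0 r0 c0 := by
    have hx := hcell r0 c0 hr0 hc0
    rw [procB_self] at hx
    simpa using hx
  have hvfF : (if gN dp0 r0 c0 = 0 then gN a r0 c0 else gN dp0 r0 c0) = fF dp0 b r0 c0 := by
    by_cases h00 : gN dp0 r0 c0 = 0
    · rw [if_pos h00, hcur, pend_proc, fF_eq, if_neg (not_not_intro h00)]
    · rw [if_neg h00, fF_eq, if_pos h00]
  -- the three (potential) writes, Nat-indexed
  have ha1len : (sN a r0 c0 (if gN dp0 r0 c0 = 0 then gN a r0 c0 else gN dp0 r0 c0)).length = R + 1 := by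
    rw [length_sN, hlen]
  set v : Int := if gN dp0 r0 c0 = 0 then gN a r0 c0 else gN dp0 r0 c0 with hvdef
  set a1 : List (List Int) := sN a r0 c0 v with ha1
  set kk : Int := gN b r0 c0 with hkk
  set kn : Nat := kk.toNat with hkn
  -- the final state, by cases on the pushes
  set u1 : Nat := r0 + kn with hu1
  set w1 : Nat := c0 + kn with hw1
  set a2 : List (List Int) := if 0 < kk ∧ u1 ≤ R then sN a1 u1 c0 (gN a1 u1 c0 + v) else a1 with ha2
  set a3 : List (List Int) := if 0 < kk ∧ w1 ≤ C then sN a2 r0 w1 (gN a2 r0 w1 + v) else a2 with ha3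
  have hstep : pvStepB dp0 b (R:Int) (C:Int) a (r0:Int) (c0:Int) = a3 := by
    unfold pvStepB
    simp only [pvGet2_natCast, pvSet2_natCast]
    rw [← hvdef, ← ha1, ← hkk]
    by_cases hp : 0 < kk
    · rw [if_pos hp]
      have hcast1 : (r0:Int) + kk = ((u1:Nat):Int) := by rw [hu1, hkn]; push_cast; omega
      have hcast2 : (c0:Int) + kk = ((w1:Nat):Int) := by rw [hw1, hkn]; push_cast; omega
      rw [hcast1, hcast2]
      simp only [pvGet2_natCast, pvSet2_natCast]
      have hb1 : (((u1:Nat):Int) ≤ (R:Int)) = (0 < kk ∧ u1 ≤ R) := by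
        simp only [eq_iff_iff]
        constructor
        · intro hh; exact ⟨hp, by exact_mod_cast hh⟩
        · intro hh; exact_mod_cast hh.2
      have hb2 : (((w1:Nat):Int) ≤ (C:Int)) = (0 < kk ∧ w1 ≤ C) := by
        simp only [eq_iff_iff]
        constructor
        · intro hh; exact ⟨hp, by exact_mod_cast hh⟩
        · intro hh; exact_mod_cast hh.2
      rw [ha3, ha2]
      by_cases hq1 : 0 < kk ∧ u1 ≤ R
      · rw [if_pos hq1, if_pos (show ((u1:Nat):Int) ≤ (R:Int) by exact_mod_cast hq1.2)]
        by_cases hq2 : 0 < kk ∧ w1 ≤ C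
        · rw [if_pos hq2, if_pos (show ((w1:Nat):Int) ≤ (C:Int) by exact_mod_cast hq2.2)]
        · rw [if_neg hq2, if_neg (show ¬ ((w1:Nat):Int) ≤ (C:Int) by
            intro hh; exact hq2 ⟨hp, by exact_mod_cast hh⟩)]
      · rw [if_neg hq1, if_neg (show ¬ ((u1:Nat):Int) ≤ (R:Int) by
          intro hh; exact hq1 ⟨hp, by exact_mod_cast hh⟩)]
        by_cases hq2 : 0 < kk ∧ w1 ≤ C
        · rw [if_pos hq2, if_pos (show ((w1:Nat):Int) ≤ (C:Int) by exact_mod_cast hq2.2)]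
        · rw [if_neg hq2, if_neg (show ¬ ((w1:Nat):Int) ≤ (C:Int) by
            intro hh; exact hq2 ⟨hp, by exact_mod_cast hh⟩)]
    · rw [if_neg hp, ha3, ha2,
        if_neg (fun hh => hp hh.1), if_neg (fun hh => hp hh.1)]
  rw [hstep]
  -- shapes
  have hlen3 : a3.length = R + 1 := by
    rw [ha3]; split
    · rw [length_sN, ha2]; split
      · rw [length_sN, ha1, length_sN, hlen]
      · rw [ha1, length_sN, hlen]
    · rw [ha2]; split
      · rw [length_sN, ha1, length_sN, hlen]
      · rw [ha1, length_sN, hlen]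
  have hrow3 : ∀ r : Nat, r < R + 1 → ((a3.getD r []).length = C + 1) := by
    intro r hr
    have e3 : (a3.getD r []).length = (a2.getD r []).length := by
      rw [ha3]; split
      · rw [row_sN]
      · rfl
    have e2 : (a2.getD r []).length = (a1.getD r []).length := by
      rw [ha2]; split
      · rw [row_sN]
      · rfl
    rw [e3, e2, ha1, row_sN]
    exact hrow r hr
  -- per-cell values of the new state
  have hkpos_iff : 0 < kk ↔ 0 < kn := by rw [hkn]; omega
  have hval : ∀ r c : Nat, r ≤ R → c ≤ C →
      gN a3 r c =
        if r = r0 ∧ c = c0 then v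
        else if 0 < kk ∧ r = u1 ∧ c = c0 then gN a r c + v
        else if 0 < kk ∧ r = r0 ∧ c = w1 then gN a r c + v
        else gN a r c := by
    intro r c hr hc
    by_cases h1 : r = r0 ∧ c = c0
    · rw [if_pos h1]
      obtain ⟨rfl, rfl⟩ := h1
      have hva1 : gN a1 r c = v := by
        rw [ha1]
        exact gN_sN_eq a r c v (by omega) (by rw [show (a.getD r []).length = C + 1 from hrow r (by omega)]; omega)
      have hva2 : gN a2 r c = v := by
        rw [ha2]; split
        · next hq =>
          rw [gN_sN_ne _ _ _ _ _ _ (fun hh => by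
            have : 0 < kn := hkpos_iff.mp hq.1
            omega)]
          exact hva1
        · exact hva1
      rw [ha3]; split
      · next hq =>
        rw [gN_sN_ne _ _ _ _ _ _ (fun hh => by
          have : 0 < kn := hkpos_iff.mp hq.1
          omega)]
        exact hva2
      · exact hva2
    · rw [if_neg h1]
      have hva1 : gN a1 r c = gN a r c := by rw [ha1]; exact gN_sN_ne _ _ _ _ _ _ h1
      by_cases h2 : 0 < kk ∧ r = u1 ∧ c = c0
      · rw [if_pos h2]
        have hknpos : 0 < kn := hkpos_iff.mp h2.1
        have hq1 : 0 < kk ∧ u1 ≤ R := ⟨h2.1, by omega⟩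
        have hva2 : gN a2 r c = gN a r c + v := by
          rw [ha2, if_pos hq1, ← h2.2.1, ← h2.2.2]
          rw [gN_sN_eq a1 r c _ (by rw [ha1, length_sN]; omega)
            (by rw [ha1, row_sN, show (a.getD r []).length = C + 1 from hrow r (by omega)]; omega)]
          rw [hva1]
        rw [ha3]; split
        · next hq =>
          rw [gN_sN_ne _ _ _ _ _ _ (fun hh => by
            have : 0 < kn := hkpos_iff.mp hq.1
            omega)]
          exact hva2
        · exact hva2
      · rw [if_neg h2]
        by_cases h3 : 0 < kk ∧ r = r0 ∧ c = w1
        · rw [if_pos h3]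
          have hknpos : 0 < kn := hkpos_iff.mp h3.1
          have hq2 : 0 < kk ∧ w1 ≤ C := ⟨h3.1, by omega⟩
          have hva2 : gN a2 r c = gN a r c := by
            rw [ha2]; split
            · next hq =>
              rw [gN_sN_ne _ _ _ _ _ _ (fun hh => by
                have : 0 < kn := hkpos_iff.mp hq.1
                omega)]
              exact hva1
            · exact hva1
          rw [ha3, if_pos hq2, ← h3.2.1, ← h3.2.2]
          rw [gN_sN_eq a2 r c _
            (by rw [show a2.length = R + 1 from by
              rw [ha2]; split
              · rw [length_sN, ha1, length_sN, hlen]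
              · rw [ha1, length_sN, hlen]]; omega)
            (by rw [show (a2.getD r []).length = C + 1 from by
              have e2 : (a2.getD r []).length = (a1.getD r []).length := by
                rw [ha2]; split
                · rw [row_sN]
                · rfl
              rw [e2, ha1, row_sN]; exact hrow r (by omega)]; omega)]
          rw [hva2]
        · rw [if_neg h3]
          have hva2 : gN a2 r c = gN a r c := by
            rw [ha2]; split
            · next hq =>
              rw [gN_sN_ne _ _ _ _ _ _ (fun hh => by
                exact h2 ⟨hq.1, hh.1, hh.2⟩)]
              exact hva1
            · exact hva1
          rw [ha3]; split
          · next hq =>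
            rw [gN_sN_ne _ _ _ _ _ _ (fun hh => by
              exact h3 ⟨hq.1, hh.1, hh.2⟩)]
            exact hva2
          · exact hva2
  -- assemble the invariant at position (r0, c0+1)
  refine ⟨hlen3, hrow3, fun r c hr hc => ?_⟩
  rw [hval r c hr hc]
  by_cases h1 : r = r0 ∧ c = c0
  · obtain ⟨rfl, rfl⟩ := h1
    rw [if_pos ⟨rfl, rfl⟩, if_pos (by rw [procB_true_iff]; omega)]
    exact hvfF
  · rw [if_neg h1, procB_step_ne r0 c0 r c h1]
    by_cases hproc : procB r0 c0 r c = true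
    · -- already-settled cells keep their final value and receive no push
      have hold := hcell r c hr hc
      rw [if_pos hproc] at hold
      have hnp1 : ¬ (0 < kk ∧ r = u1 ∧ c = c0) := by
        intro hh
        have : 0 < kn := hkpos_iff.mp hh.1
        rw [procB_true_iff] at hproc
        omega
      have hnp2 : ¬ (0 < kk ∧ r = r0 ∧ c = w1) := by
        intro hh
        have : 0 < kn := hkpos_iff.mp hh.1
        rw [procB_true_iff] at hproc
        omega
      rw [if_neg hnp1, if_neg hnp2, if_pos hproc]
      exact hold
    · -- still-pending cells: pending sum gains exactly the pushed contributions
      have hold := hcell r c hr hc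
      rw [if_neg hproc] at hold
      rw [if_neg hproc, pend_step]
      have hfalse : procB r0 c0 r c = false := Bool.eq_false_iff.mpr hproc
      by_cases h2 : 0 < kk ∧ r = u1 ∧ c = c0
      · have hknpos : 0 < kn := hkpos_iff.mp h2.1
        have hd1 : c = c0 ∧ r0 < r ∧ gN b r0 c0 = (r:Int) - (r0:Int) := by
          refine ⟨h2.2.2, by omega, ?_⟩
          rw [← hkk]
          omega
        have hd2 : ¬ (r = r0 ∧ c0 < c ∧ gN b r0 c0 = (c:Int) - (c0:Int)) := by
          intro hh
          omega
        rw [if_pos h2, if_pos hd1, if_neg hd2, hold, hvfF]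
        ring
      · rw [if_neg h2]
        by_cases h3 : 0 < kk ∧ r = r0 ∧ c = w1
        · have hknpos : 0 < kn := hkpos_iff.mp h3.1
          have hd2 : r = r0 ∧ c0 < c ∧ gN b r0 c0 = (c:Int) - (c0:Int) := by
            refine ⟨h3.2.1, by omega, ?_⟩
            rw [← hkk]
            omega
          have hd1 : ¬ (c = c0 ∧ r0 < r ∧ gN b r0 c0 = (r:Int) - (r0:Int)) := by
            intro hh
            omega
          rw [if_pos h3, if_neg hd1, if_pos hd2, hold, hvfF]
          ring
        · have hd1 : ¬ (c = c0 ∧ r0 < r ∧ gN b r0 c0 = (r:Int) - (r0:Int)) := by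
            intro hh
            refine h2 ⟨?_, ?_, hh.1⟩
            · rw [hkk]; omega
            · rw [hu1, hkn, hkk]; omega
          have hd2 : ¬ (r = r0 ∧ c0 < c ∧ gN b r0 c0 = (c:Int) - (c0:Int)) := by
            intro hh
            refine h3 ⟨?_, hh.1, ?_⟩
            · rw [hkk]; omega
            · rw [hw1, hkn, hkk]; omega
          rw [if_neg h3, if_neg hd1, if_neg hd2, hold]
          ring

theorem goB_main (dp0 b : List (List Int)) (R C : Nat) :
    Binv dp0 b R C (R+1) 0
      ((PySem.List.pyRange 0 ((R:Int) + 1) 1).foldl (fun a r =>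
        (PySem.List.pyRange 0 ((C:Int) + 1) 1).foldl
          (fun a c => pvStepB dp0 b (R:Int) (C:Int) a r c) a)
        (List.replicate ((R:Int) + 1).toNat (List.replicate ((C:Int) + 1).toNat 0))) := by
  have hRt : ((R:Int) + 1).toNat = R + 1 := by omega
  have hCt : ((C:Int) + 1).toNat = C + 1 := by omega
  have hinit : Binv dp0 b R C 0 0
      (List.replicate ((R:Int) + 1).toNat (List.replicate ((C:Int) + 1).toNat 0)) := by
    refine ⟨by rw [hRt, List.length_replicate], ?_, ?_⟩
    · intro r hr
      rw [hRt, hCt]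
      simp [List.getD_eq_getElem?_getD, hr]
    · intro r c hr hc
      have hpb : procB 0 0 r c = false := by simp [procB]
      rw [hpb, pend_zero]
      simp only [gN, hRt, hCt, List.getD_eq_getElem?_getD, List.getElem?_replicate]
      split
      · simp [List.getElem?_replicate]
        split <;> simp
      · simp
  have hwrap : ∀ r0 : Nat, ∀ a : List (List Int),
      Binv dp0 b R C r0 (C+1) a → Binv dp0 b R C (r0+1) 0 a := by
    intro r0 a ha
    obtain ⟨h1, h2, h3⟩ := ha
    refine ⟨h1, h2, fun r c hr hc => ?_⟩
    rw [h3 r c hr hc, procB_wrap r0 C r c hc, pend_wrap dp0 b r0 C r c hc]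
  have hinner : ∀ r0 : Nat, r0 ≤ R → ∀ a : List (List Int), Binv dp0 b R C r0 0 a →
      Binv dp0 b R C r0 (C+1)
        ((PySem.List.pyRange 0 ((C:Int) + 1) 1).foldl
          (fun a c => pvStepB dp0 b (R:Int) (C:Int) a (r0:Int) c) a) := by
    intro r0 hr0 a ha
    have gen : ∀ c0 : Nat, c0 ≤ C + 1 → Binv dp0 b R C r0 c0
        ((PySem.List.pyRange 0 (c0:Int) 1).foldl
          (fun a c => pvStepB dp0 b (R:Int) (C:Int) a (r0:Int) c) a) := by
      intro c0
      induction c0 with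
      | zero =>
        intro _
        rw [show ((0:Nat):Int) = 0 from rfl, PySem.List.pyRange_one_eq_nil le_rfl]
        exact ha
      | succ c0 ihc =>
        intro hcc
        rw [show ((c0+1:Nat):Int) = (c0:Int)+1 by push_cast; ring,
          PySem.List.pyRange_one_succ_right (Int.natCast_nonneg c0),
          List.foldl_append, List.foldl_cons, List.foldl_nil]
        exact stepB_inv dp0 b R C r0 c0 _ hr0 (by omega) (ihc (by omega))
    have hfin := gen (C+1) le_rfl
    rw [show ((C+1:Nat):Int) = (C:Int)+1 by push_cast; ring] at hfin
    exact hfin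
  have outer : ∀ r0 : Nat, r0 ≤ R + 1 → Binv dp0 b R C r0 0
      ((PySem.List.pyRange 0 (r0:Int) 1).foldl (fun a r =>
        (PySem.List.pyRange 0 ((C:Int) + 1) 1).foldl
          (fun a c => pvStepB dp0 b (R:Int) (C:Int) a r c) a)
        (List.replicate ((R:Int) + 1).toNat (List.replicate ((C:Int) + 1).toNat 0))) := by
    intro r0
    induction r0 with
    | zero =>
      intro _
      rw [show ((0:Nat):Int) = 0 from rfl, PySem.List.pyRange_one_eq_nil le_rfl]
      exact hinit
    | succ r0 ihr =>
      intro hrr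
      rw [show ((r0+1:Nat):Int) = (r0:Int)+1 by push_cast; ring,
        PySem.List.pyRange_one_succ_right (Int.natCast_nonneg r0),
        List.foldl_append, List.foldl_cons, List.foldl_nil]
      exact hwrap r0 _ (hinner r0 (by omega) _ (ihr (by omega)))
  have hfin := outer (R+1) le_rfl
  rw [show ((R+1:Nat):Int) = (R:Int)+1 by push_cast; ring] at hfin
  exact hfin

-- ===== VERDICT (by name: the statement is the Claim_ definition above) =====
theorem get_path_counts_spec : Claim_equal_get_path_counts := by
  intro row col dp board size _ hPre
  unfold Spec_get_path_counts
  by_cases hb : 0 ≤ row ∧ row < size ∧ 0 ≤ col ∧ col < size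
  case neg =>
    unfold get_path_counts get_path_counts_alt
    simp only [pvGoA]
    rw [if_pos hb, if_pos hb]
  case pos =>
    obtain ⟨h1, h2, h3, h4⟩ := hb
    obtain ⟨i, rfl⟩ : ∃ i : Nat, row = (i:Int) := ⟨row.toNat, (Int.toNat_of_nonneg h1).symm⟩
    obtain ⟨j, rfl⟩ : ∃ j : Nat, col = (j:Int) := ⟨col.toNat, (Int.toNat_of_nonneg h3).symm⟩
    have hPre' := hPre ⟨h1, h2, h3, h4⟩
    rw [Int.toNat_natCast] at hPre'
    have hrect : rectOK dp i j := by
      intro r hr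
      obtain ⟨hd, hbd, hdr, hbr⟩ := hPre' r (by omega)
      rw [Int.toNat_natCast] at hdr
      exact ⟨hd, hdr⟩
    have hPinit : ∀ r c : Nat, r ≤ i → c ≤ j → Pcell dp board dp r c := by
      intro r c _ _
      by_cases h : gN dp r c = 0
      · exact Or.inr ⟨h, h⟩
      · exact Or.inl (by rw [fF_eq, if_pos h])
    have hA := goA_main dp board size (i + j + 1) i j dp (by omega) h2 h4 hrect
      (shapeEq_refl dp) hPinit
    have hB := (goB_main dp board i j).2.2 i j le_rfl le_rfl
    rw [if_pos ((procB_true_iff _ _ _ _).mpr (by omega))] at hB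
    unfold get_path_counts get_path_counts_alt
    rw [if_neg (not_not_intro ⟨h1, h2, h3, h4⟩)]
    rw [Int.toNat_natCast, Int.toNat_natCast]
    show (pvGoA (i + j + 1) (i:Int) (j:Int) dp board size).1
      = pvGet2
          ((PySem.List.pyRange 0 ((i:Int) + 1) 1).foldl (fun a r =>
            (PySem.List.pyRange 0 ((j:Int) + 1) 1).foldl
              (fun a c => pvStepB dp board (i:Int) (j:Int) a r c) a)
            (List.replicate ((i:Int) + 1).toNat (List.replicate ((j:Int) + 1).toNat 0)))
          (i:Int) (j:Int)
    rw [hA.1, pvGet2_natCast, hB]
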